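-- pv_equiv track=rewrite | github.com/ManuelNuniez/Collage_Programs | Python/Guia 3/Ejercicio 2.py | MatrizC
-- ===== SOURCE A (Python) =====
-- def MatrizC(filas,columnas):
--     matriz=[[0]*columnas for i in range(filas)]
--     limite=columnas
--     acum=filas ##el numero mas grande de la matriz que va arriba de todo
--     veces=1 ##repeticiones ded numero en cada fila
--     for f in range(filas):
--         for i in range(0,veces):
--             matriz[f].insert(0,acum) ##agrega el numero al principio la cantidad que sea "veces" en cada caso
--         acum-=1
--         veces+=1
--         matriz[f]=matriz[f][ :limite] ##saco lo sobrante con una rebanada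
--
--     return matriz
-- ===== SOURCE B (Python) =====
-- def MatrizC(filas, columnas):
--     return [([filas - f] * (f + 1) + [0] * columnas)[:columnas] for f in range(filas)]
-- ===== Notes on version B (the rewrite author's own statement) =====
-- stated objective: faster
-- what changed: Each row is constructed directly as [filas-f]*(f+1) + zeros sliced to columnas in one comprehension, replacing A's repeated O(row-length) front-inserts into a preallocated zero matrix; intended as faster (a timing run measured 11.7x at the largest size both programs finished; unconfirmed at the top size, where one huge-output input times both out).
import Mathlib
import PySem

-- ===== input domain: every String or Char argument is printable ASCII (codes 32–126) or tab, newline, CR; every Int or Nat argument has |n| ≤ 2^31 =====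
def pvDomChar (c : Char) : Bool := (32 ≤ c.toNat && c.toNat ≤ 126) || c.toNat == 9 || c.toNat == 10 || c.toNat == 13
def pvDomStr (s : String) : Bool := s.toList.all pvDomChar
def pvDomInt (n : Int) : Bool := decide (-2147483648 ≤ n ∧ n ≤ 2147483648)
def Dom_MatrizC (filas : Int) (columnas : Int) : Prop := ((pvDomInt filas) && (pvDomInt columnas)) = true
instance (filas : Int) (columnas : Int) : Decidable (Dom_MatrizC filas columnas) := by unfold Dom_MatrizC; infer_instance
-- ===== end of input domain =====

-- B builds each row directly as repetitions ++ zeros sliced to columnas, instead of A's repeated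
-- front-inserts into a preallocated zero matrix; intended as faster (timing run measured 11.7x at
-- the largest size both finished, unconfirmed beyond); return values proved equal.

-- ===== PORT A =====
-- A's loop state: (matriz, acum, veces); matriz[f] is updated in place (here: pySetD)
-- body of A's outer for-loop, named so the proofs can treat it as one step
def MatrizC.step (limite : Int) (st : List (List Int) × Int × Int) (f : Int) :
    List (List Int) × Int × Int :=
  let matriz := st.1
  let acum := st.2.1
  let veces := st.2.2
  let row := (PySem.List.pyRange 0 veces 1).foldl
    (fun r _ => PySem.List.insert r 0 acum) (PySem.List.pyGetD matriz f [])
  let matriz' := PySem.List.pySetD matriz f (PySem.List.slice row none (some limite))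
  (matriz', acum - 1, veces + 1)

def MatrizC (filas : Int) (columnas : Int) : List (List Int) :=
  let matriz := (PySem.List.pyRange 0 filas 1).map
    (fun _ => List.replicate columnas.toNat (0 : Int))
  let limite := columnas
  let st := (PySem.List.pyRange 0 filas 1).foldl (MatrizC.step limite) (matriz, filas, 1)
  st.1

-- ===== PORT B =====
def MatrizC_alt (filas : Int) (columnas : Int) : List (List Int) :=
  (PySem.List.pyRange 0 filas 1).map (fun f =>
    PySem.List.slice
      (List.replicate (f + 1).toNat (filas - f) ++ List.replicate columnas.toNat (0 : Int))
      none (some columnas))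

-- ===== PRECONDITION & SPEC =====
def Spec_MatrizC (filas : Int) (columnas : Int) (out : List (List Int)) : Prop := out = MatrizC_alt filas columnas
instance (filas : Int) (columnas : Int) (out : List (List Int)) : Decidable (Spec_MatrizC filas columnas out) := by unfold Spec_MatrizC; infer_instance

-- ===== CLAIM (what is proved, stated in full; the proofs are below) =====
def Claim_equal_MatrizC : Prop := ∀ (filas : Int) (columnas : Int), Dom_MatrizC filas columnas → Spec_MatrizC filas columnas (MatrizC filas columnas)

-- ===== LEMMAS AND PROOFS =====

-- the inner for-loop prepends acum 'veces' times
theorem innerLoop_eq (acum : Int) (veces : Int) (r : List Int) :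
    (PySem.List.pyRange 0 veces 1).foldl (fun r _ => PySem.List.insert r 0 acum) r
      = List.replicate veces.toNat acum ++ r := by
  rw [PySem.List.pyRange_one]
  simp only [Int.sub_zero]
  induction veces.toNat generalizing r with
  | zero => simp
  | succ n ih =>
      rw [List.range_succ]
      simp only [List.map_append, List.foldl_append]
      rw [ih]
      simp only [PySem.List.insert, PySem.List.sliceIndices]
      norm_num
      rw [List.replicate_succ, List.cons_append]

-- loop invariant for A's outer fold: rows before position a are final, the rest are zero rows
theorem outerLoop_eq (filas columnas : Int) :
    ∀ (n : Nat) (a : Int) (done : List (List Int)),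
      0 ≤ a → done.length = a.toNat → (filas - a).toNat = n →
      ((PySem.List.pyRange a filas 1).foldl (MatrizC.step columnas)
        (done ++ List.replicate n (List.replicate columnas.toNat (0 : Int)), filas - a, a + 1)).1
      = done ++ (PySem.List.pyRange a filas 1).map (fun f =>
          PySem.List.slice
            (List.replicate (f + 1).toNat (filas - f) ++ List.replicate columnas.toNat (0 : Int))
            none (some columnas)) := by
  intro n
  induction n with
  | zero =>
      intro a done ha hlen hn
      rw [PySem.List.pyRange_one_eq_nil (by omega)]
      simp
  | succ n ih =>
      intro a done ha hlen hn
      rw [PySem.List.pyRange_one_cons (by omega)]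
      simp only [List.foldl_cons, List.map_cons]
      rw [List.replicate_succ]
      -- evaluate one iteration
      have hget : PySem.List.pyGetD
          (done ++ List.replicate columnas.toNat (0:Int) ::
            List.replicate n (List.replicate columnas.toNat (0:Int))) a []
          = List.replicate columnas.toNat (0:Int) := by
        rw [PySem.List.pyGetD_eq_getElem _ [] ha (by simp; omega)]
        rw [List.getElem_append_right (by omega)]
        simp [hlen]
      have hset : PySem.List.pySetD
          (done ++ List.replicate columnas.toNat (0:Int) ::
            List.replicate n (List.replicate columnas.toNat (0:Int))) a
          (PySem.List.slice
            (List.replicate (a + 1).toNat (filas - a) ++ List.replicate columnas.toNat (0:Int))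
            none (some columnas))
          = (done ++ [PySem.List.slice
              (List.replicate (a + 1).toNat (filas - a) ++ List.replicate columnas.toNat (0:Int))
              none (some columnas)])
            ++ List.replicate n (List.replicate columnas.toNat (0:Int)) := by
        rw [PySem.List.pySetD_of_nonneg _ _ ha]
        rw [List.set_append_right _ _ (by omega)]
        simp [hlen]
      have hstep : MatrizC.step columnas
          (done ++ List.replicate columnas.toNat (0:Int) ::
            List.replicate n (List.replicate columnas.toNat (0:Int)), filas - a, a + 1)
          a
          = ((done ++ [PySem.List.slice
              (List.replicate (a + 1).toNat (filas - a) ++ List.replicate columnas.toNat (0:Int))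
              none (some columnas)])
            ++ List.replicate n (List.replicate columnas.toNat (0:Int)),
            filas - (a + 1), (a + 1) + 1) := by
        simp only [MatrizC.step, hget, innerLoop_eq, hset, Prod.mk.injEq]
        refine ⟨trivial, by ring, trivial⟩
      rw [hstep, ih (a + 1) _ (by omega) (by simp [hlen]; omega) (by omega)]
      simp

-- ===== VERDICT (by name: the statement is the Claim_ definition above) =====
theorem MatrizC_spec : Claim_equal_MatrizC := by
  intro filas columnas _
  unfold Spec_MatrizC MatrizC MatrizC_alt
  by_cases h : filas ≤ 0
  · rw [PySem.List.pyRange_one_eq_nil (by omega)]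
    simp
  · have h0 : (0:Int) ≤ 0 := le_refl 0
    have hmap : (PySem.List.pyRange 0 filas 1).map
        (fun _ => List.replicate columnas.toNat (0 : Int))
        = List.replicate (filas - 0).toNat (List.replicate columnas.toNat (0 : Int)) := by
      rw [List.map_const']
      rw [PySem.List.length_pyRange_one]
    simp only [hmap]
    have := outerLoop_eq filas columnas (filas - 0).toNat 0 [] (le_refl 0) (by simp) rfl
    simp only [List.nil_append, Int.sub_zero, zero_add] at this ⊢
    exact this
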